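-- pv_equiv track=rewrite | github.com/hanztup/csc_cbert | metrics/csc_metric.py | count_confusion_matrix
-- ===== SOURCE A (Python) =====
-- def count_confusion_matrix(pred_labels, gold_labels):
--     true_positive, true_negative, false_positive, false_negative = 0, 0, 0, 0
--
--     for i, (pred, gold) in enumerate(zip(pred_labels, gold_labels)):
--         if gold == "1":
--             if pred == gold:
--                 true_positive += 1
--             else:
--                 false_negative += 1
--         elif gold == "0":
--             if pred == gold:
--                 true_negative += 1
--             else:
--                 false_positive += 1
--         else:
--             raise ValueError("Wrong label value.")
--
--     return true_positive, false_positive, false_negative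
-- ===== SOURCE B (Python) =====
-- def count_confusion_matrix(pred_labels, gold_labels):
--     # Tabulate once: counter over (gold, pred) pairs, then read the cells off.
--     counts = {}
--     for pair in zip(gold_labels, pred_labels):
--         counts[pair] = counts.get(pair, 0) + 1
--     for g, _ in counts:
--         if g not in ("0", "1"):
--             raise ValueError("Wrong label value.")
--     true_positive = counts.get(("1", "1"), 0)
--     false_negative = sum(c for (g, p), c in counts.items() if g == "1" and p != "1")
--     false_positive = sum(c for (g, p), c in counts.items() if g == "0" and p != "0")
--     return true_positive, false_positive, false_negative
-- ===== Notes on version B (the rewrite author's own statement) =====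
-- stated objective: idiomatic
-- what changed: B builds one counter table over the zipped (gold, pred) pairs, validates the distinct gold keys once, and reads TP/FP/FN off the table, replacing A's per-element four-way branch over four running accumulators.
import Mathlib
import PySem

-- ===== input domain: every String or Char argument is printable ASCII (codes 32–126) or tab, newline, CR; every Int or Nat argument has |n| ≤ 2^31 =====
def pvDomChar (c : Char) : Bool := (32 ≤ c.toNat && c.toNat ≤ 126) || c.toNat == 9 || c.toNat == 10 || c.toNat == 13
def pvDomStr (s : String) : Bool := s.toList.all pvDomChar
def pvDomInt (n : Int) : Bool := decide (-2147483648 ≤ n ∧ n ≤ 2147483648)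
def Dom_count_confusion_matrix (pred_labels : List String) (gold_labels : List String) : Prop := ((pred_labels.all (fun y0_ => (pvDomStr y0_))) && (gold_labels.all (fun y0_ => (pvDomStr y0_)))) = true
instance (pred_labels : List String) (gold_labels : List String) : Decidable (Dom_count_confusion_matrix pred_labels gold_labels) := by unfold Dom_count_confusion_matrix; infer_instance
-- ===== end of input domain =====

-- B tabulates a counter over (gold, pred) pairs once and reads the confusion cells off the
-- table, instead of A's per-element 4-way branch; objective: idiomatic, same O(n) cost.

-- ===== PORT A =====
-- A's loop over zip(pred_labels, gold_labels) with the four running counters; the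
-- 'raise ValueError' branch (excluded by Pre_) aborts the loop with the current state.
def cmLoopA : List (String × String) → Int × Int × Int × Int → Int × Int × Int × Int
  | [], st => st
  | (pred, gold) :: rest, (tp, tn, fp, fn) =>
    if gold = "1" then
      if pred = gold then cmLoopA rest (tp + 1, tn, fp, fn)
      else cmLoopA rest (tp, tn, fp, fn + 1)
    else if gold = "0" then
      if pred = gold then cmLoopA rest (tp, tn + 1, fp, fn)
      else cmLoopA rest (tp, tn, fp + 1, fn)
    else (tp, tn, fp, fn)  -- raise ValueError("Wrong label value."): excluded by Pre_

def count_confusion_matrix (pred_labels : List String) (gold_labels : List String) : Int × Int × Int :=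
  let st := cmLoopA (pred_labels.zip gold_labels) (0, 0, 0, 0)
  (st.1, st.2.2.1, st.2.2.2)

-- ===== PORT B =====
def count_confusion_matrix_alt (pred_labels : List String) (gold_labels : List String) : Int × Int × Int :=
  let counts : PySem.Dict (String × String) Int :=
    (gold_labels.zip pred_labels).foldl (fun d pr => d.insert pr (d.getD pr 0 + 1)) PySem.Dict.empty
  if counts.keys.any (fun pr => !(pr.1 == "0" || pr.1 == "1")) then
    (0, 0, 0)  -- raise ValueError("Wrong label value."): excluded by Pre_
  else
    let tp := counts.getD ("1", "1") 0
    let fn := (((counts.items.filter (fun x => x.1.1 == "1" && !(x.1.2 == "1")))).map (·.2)).sum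
    let fp := (((counts.items.filter (fun x => x.1.1 == "0" && !(x.1.2 == "0")))).map (·.2)).sum
    (tp, fp, fn)

-- ===== PRECONDITION & SPEC =====
-- Pre_ excludes exactly the inputs on which A raises ValueError: some gold label in the
-- zipped region is neither "0" nor "1" (B raises there too).
def Pre_count_confusion_matrix (pred_labels : List String) (gold_labels : List String) : Prop :=
  ∀ x ∈ pred_labels.zip gold_labels, x.2 = "0" ∨ x.2 = "1"
instance (pred_labels : List String) (gold_labels : List String) : Decidable (Pre_count_confusion_matrix pred_labels gold_labels) := by unfold Pre_count_confusion_matrix; infer_instance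
def pvWitness_count_confusion_matrix : List String × List String := (["1", "0", "1", "0"], ["1", "1", "0", "0"])

def Spec_count_confusion_matrix (pred_labels : List String) (gold_labels : List String) (out : Int × Int × Int) : Prop := out = count_confusion_matrix_alt pred_labels gold_labels
instance (pred_labels : List String) (gold_labels : List String) (out : Int × Int × Int) : Decidable (Spec_count_confusion_matrix pred_labels gold_labels out) := by unfold Spec_count_confusion_matrix; infer_instance

-- ===== CLAIM (what is proved, stated in full; the proofs are below) =====
def Claim_equal_count_confusion_matrix : Prop := ∀ (pred_labels : List String) (gold_labels : List String), Dom_count_confusion_matrix pred_labels gold_labels → Pre_count_confusion_matrix pred_labels gold_labels → Spec_count_confusion_matrix pred_labels gold_labels (count_confusion_matrix pred_labels gold_labels)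

-- ===== LEMMAS AND PROOFS =====

-- predicates for the three returned cells, on (pred, gold) pairs
def tpP (x : String × String) : Bool := x.2 == "1" && x.1 == "1"
def fpP (x : String × String) : Bool := x.2 == "0" && !(x.1 == "0")
def fnP (x : String × String) : Bool := x.2 == "1" && !(x.1 == "1")

-- A's loop adds the three counts to whatever accumulators it starts from
theorem cmLoopA_eq (l : List (String × String)) (h : ∀ x ∈ l, x.2 = "0" ∨ x.2 = "1")
    (tp tn fp fn : Int) :
    cmLoopA l (tp, tn, fp, fn) =
      (tp + l.countP tpP, tn + l.countP (fun x => x.2 == "0" && x.1 == "0"),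
       fp + l.countP fpP, fn + l.countP fnP) := by
  induction l generalizing tp tn fp fn with
  | nil => simp [cmLoopA]
  | cons x rest ih =>
    obtain ⟨p, g⟩ := x
    have hg := h (p, g) (List.mem_cons_self)
    have hrest : ∀ x ∈ rest, x.2 = "0" ∨ x.2 = "1" := fun x hx => h x (List.mem_cons_of_mem _ hx)
    rcases hg with hg | hg <;> subst hg <;>
      simp only [cmLoopA, if_pos] <;>
      by_cases hp : p = "0" <;> by_cases hp1 : p = "1" <;>
        simp_all [tpP, fpP, fnP, ih hrest] <;> ring_nf

-- sum of a counter's values over the keys satisfying q = countP q on the base list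
theorem sum_counter_filter {α : Type} [BEq α] [LawfulBEq α] [DecidableEq α]
    (xs : List α) (q : α → Bool) :
    ((((PySem.Dict.counter xs).items.filter (fun x => q x.1))).map (·.2)).sum
      = (xs.countP q : Int) := by
  rw [PySem.Dict.items_counter, List.filter_map, List.map_map]
  have hperm : (PySem.Set.ofList xs).Perm xs.dedup :=
    (List.perm_ext_iff_of_nodup (PySem.Set.nodup_ofList xs) xs.nodup_dedup).mpr
      (fun a => by rw [PySem.Set.mem_ofList, List.mem_dedup])
  have h2 := ((hperm.filter (fun k => q k)).map (fun k => ((List.count k xs : Nat) : Int))).sum_eq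
  have h3 := List.sum_map_count_dedup_filter_eq_countP (l := xs) q
  rw [lawful_beq_subsingleton (instBEqOfDecidableEq : BEq α) ‹BEq α›] at h3
  simp only [Function.comp_def]
  rw [h2, ← h3]
  push_cast
  simp [List.map_map, Function.comp_def]

-- counting over the swapped zip
theorem countP_zip_swap (pred_labels gold_labels : List String) (q : String × String → Bool) :
    (gold_labels.zip pred_labels).countP q
      = (pred_labels.zip gold_labels).countP (fun x => q x.swap) := by
  rw [← List.zip_swap pred_labels gold_labels, List.countP_map]
  rfl

-- ===== VERDICT (by name: the statement is the Claim_ definition above) =====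
theorem count_confusion_matrix_spec : Claim_equal_count_confusion_matrix := by
  intro pred_labels gold_labels _ hpre
  unfold Spec_count_confusion_matrix count_confusion_matrix count_confusion_matrix_alt
  rw [PySem.Dict.foldl_insert_getD_add_one_eq_counter]
  have hguard : ((PySem.Dict.counter (gold_labels.zip pred_labels)).keys.any
      (fun pr => !(pr.1 == "0" || pr.1 == "1"))) = false := by
    rw [PySem.Dict.keys_counter]
    simp only [List.any_eq_false]
    intro pr hpr
    have hsw : pr.swap ∈ pred_labels.zip gold_labels := by
      have := List.mem_map_of_mem (f := Prod.swap) ((PySem.Set.mem_ofList _ _).mp hpr)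
      rwa [List.zip_swap] at this
    rcases hpre pr.swap hsw with h | h <;> simp [Prod.swap] at h <;> simp [h]
  rw [if_neg (by rw [hguard]; exact Bool.false_ne_true)]
  simp only
  rw [cmLoopA_eq _ hpre 0 0 0 0]
  rw [PySem.Dict.getD_counter]
  rw [sum_counter_filter (gold_labels.zip pred_labels) (fun k => k.1 == "1" && !(k.2 == "1"))]
  rw [sum_counter_filter (gold_labels.zip pred_labels) (fun k => k.1 == "0" && !(k.2 == "0"))]
  rw [List.count_eq_countP]
  rw [countP_zip_swap pred_labels gold_labels,
      countP_zip_swap pred_labels gold_labels,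
      countP_zip_swap pred_labels gold_labels]
  have e1 : (pred_labels.zip gold_labels).countP tpP
      = (pred_labels.zip gold_labels).countP (fun x => x.swap == (("1" : String), ("1" : String))) :=
    List.countP_congr (fun x _ => by obtain ⟨a, b⟩ := x; simp [tpP, Prod.swap, and_comm])
  have e2 : (pred_labels.zip gold_labels).countP fpP
      = (pred_labels.zip gold_labels).countP
          (fun x => (fun k : String × String => k.1 == "0" && !(k.2 == "0")) x.swap) :=
    List.countP_congr (fun x _ => by obtain ⟨a, b⟩ := x; simp [fpP, Prod.swap])
  have e3 : (pred_labels.zip gold_labels).countP fnP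
      = (pred_labels.zip gold_labels).countP
          (fun x => (fun k : String × String => k.1 == "1" && !(k.2 == "1")) x.swap) :=
    List.countP_congr (fun x _ => by obtain ⟨a, b⟩ := x; simp [fnP, Prod.swap])
  rw [e1, e2, e3]
  simp
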